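-- pv_equiv track=rewrite | github.com/Vaxity1/Aether | python/main/main.py | get_text_stats
-- ===== SOURCE A (Python) =====
-- from typing import Any, Dict, Optional, Tuple
-- from typing import TYPE_CHECKING, Any
--
-- def split_lines(text: str) -> list[str]:
--     """Split text into lines, handling all common line endings."""
--     return text.replace('\r\n', '\n').replace('\r', '\n').split('\n')
--
-- def remove_empty_lines(lines: list[str]) -> list[str]:
--     """Remove empty or whitespace-only lines."""
--     return [line for line in lines if line.strip()]
--
-- def get_text_stats(text: str) -> dict[str, Any]:
--     lines = split_lines(text)
--     nonempty = remove_empty_lines(lines)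
--     chars = len(text)
--     words = len(text.split())
--     return {
--         'lines': len(lines),
--         'nonempty_lines': len(nonempty),
--         'characters': chars,
--         'words': words,
--         'avg_line_length': chars // len(lines) if lines else 0,
--         'avg_word_length': (sum(len(w) for w in text.split()) // words) if words else 0
--     }
-- ===== SOURCE B (Python) =====
-- def get_text_stats(text: str) -> dict:
--     n = len(text)
--     lines = 1
--     nonempty = 0
--     words = 0
--     nonws = 0
--     line_has = False
--     in_word = False
--     i = 0
--     while i < n:
--         ch = text[i]
--         if ch == '\r' or ch == '\n':
--             if ch == '\r' and i + 1 < n and text[i + 1] == '\n':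
--                 i += 1
--             lines += 1
--             if line_has:
--                 nonempty += 1
--             line_has = False
--             in_word = False
--         elif ch.isspace():
--             in_word = False
--         else:
--             if not in_word:
--                 words += 1
--             in_word = True
--             line_has = True
--             nonws += 1
--         i += 1
--     if line_has:
--         nonempty += 1
--     return {
--         'lines': lines,
--         'nonempty_lines': nonempty,
--         'characters': n,
--         'words': words,
--         'avg_line_length': n // lines,
--         'avg_word_length': (nonws // words) if words else 0
--     }
-- ===== Notes on version B (the rewrite author's own statement) =====
-- stated objective: alternative
-- what changed: Replaced A's pipeline of whole-string rewrites and list materializations (two replace passes, a newline split, a strip-filter pass and two whitespace splits) by a single linear scan over the characters that maintains line/nonempty-line/word/non-whitespace counters with CRLF coalescing and an in-word flag.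
import Mathlib
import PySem

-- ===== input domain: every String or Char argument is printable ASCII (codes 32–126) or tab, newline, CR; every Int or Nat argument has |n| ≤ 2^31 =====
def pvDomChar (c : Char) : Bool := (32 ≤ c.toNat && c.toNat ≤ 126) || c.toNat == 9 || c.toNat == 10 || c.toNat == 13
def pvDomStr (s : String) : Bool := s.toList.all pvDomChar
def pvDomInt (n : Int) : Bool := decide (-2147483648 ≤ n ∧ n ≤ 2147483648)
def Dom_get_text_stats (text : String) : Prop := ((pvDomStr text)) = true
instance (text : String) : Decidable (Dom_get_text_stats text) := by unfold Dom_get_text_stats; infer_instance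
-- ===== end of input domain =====

-- B replaces A's pipeline of string rewrites and list materializations by one linear scan
-- keeping line/word/char counters; equivalence is proved for the returned value.

-- ===== PORT A =====
-- split_lines: text.replace('\r\n','\n').replace('\r','\n').split('\n')
def split_lines (cs : List Char) : List (List Char) :=
  PySem.Chars.splitOn
    (PySem.Chars.replace (PySem.Chars.replace cs ['\r', '\n'] ['\n']) ['\r'] ['\n'])
    ['\n']

-- remove_empty_lines: [line for line in lines if line.strip()]
def remove_empty_lines (lines : List (List Char)) : List (List Char) :=
  lines.filter (fun line => !(PySem.Chars.strip line).isEmpty)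

def get_text_stats (text : String) : List (String × Int) :=
  let cs := text.toList
  let lines := split_lines cs
  let nonempty := remove_empty_lines lines
  let chars : Int := (cs.length : Int)
  let words : Int := ((PySem.Chars.split₀ cs).length : Int)
  [("lines", (lines.length : Int)),
   ("nonempty_lines", (nonempty.length : Int)),
   ("characters", chars),
   ("words", words),
   ("avg_line_length", if lines.isEmpty then 0 else PySem.Int.floordiv chars (lines.length : Int)),
   ("avg_word_length",
     if words = 0 then 0
     else PySem.Int.floordiv (((PySem.Chars.split₀ cs).map (fun w => (w.length : Int))).sum) words)]

-- ===== PORT B =====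
-- the while-loop of Source B: state (lines, nonempty, words, nonws, line_has, in_word),
-- consuming '\r\n' as a single break by look-ahead, returning the state after the loop
def pvScan : List Char → Int → Int → Int → Int → Bool → Bool → Int × Int × Int × Int × Bool
  | [], lines, ne, w, nw, lh, _iw => (lines, ne, w, nw, lh)
  | c :: t, lines, ne, w, nw, lh, iw =>
    if c = '\r' ∨ c = '\n' then
      pvScan (if c = '\r' ∧ t.head? = some '\n' then t.tail else t)
        (lines + 1) (if lh then ne + 1 else ne) w nw false false
    else if PySem.Chars.isspace c then
      pvScan t lines ne w nw lh false
    else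
      pvScan t lines ne (if iw then w else w + 1) (nw + 1) true true
termination_by cs => cs.length
decreasing_by
  · split
    · cases t <;> simp
    · simp
  · simp
  · simp

def get_text_stats_alt (text : String) : List (String × Int) :=
  let n : Int := (text.toList.length : Int)
  let r := pvScan text.toList 1 0 0 0 false false
  let lines := r.1
  let ne := if r.2.2.2.2 then r.2.1 + 1 else r.2.1
  let words := r.2.2.1
  let nonws := r.2.2.2.1
  [("lines", lines),
   ("nonempty_lines", ne),
   ("characters", n),
   ("words", words),
   ("avg_line_length", PySem.Int.floordiv n lines),
   ("avg_word_length", if words = 0 then 0 else PySem.Int.floordiv nonws words)]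

-- ===== PRECONDITION & SPEC =====
def Spec_get_text_stats (text : String) (out : List (String × Int)) : Prop := out = get_text_stats_alt text
instance (text : String) (out : List (String × Int)) : Decidable (Spec_get_text_stats text out) := by unfold Spec_get_text_stats; infer_instance

-- ===== CLAIM (what is proved, stated in full; the proofs are below) =====
def Claim_equal_get_text_stats : Prop := ∀ (text : String), Dom_get_text_stats text → Spec_get_text_stats text (get_text_stats text)

-- ===== LEMMAS AND PROOFS =====

-- proof-side spec helpers and lemmas
def pvSubst (c : Char) : Char := if c = '\r' then '\n' else c

def pvStep1 : List Char → List Char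
  | [] => []
  | c :: t => if c = '\r' ∧ t.head? = some '\n' then '\n' :: pvStep1 t.tail else c :: pvStep1 t
termination_by cs => cs.length
decreasing_by
  · cases t <;> simp
  · simp

def pvSplitLF : List Char → List (List Char)
  | [] => [[]]
  | c :: t => if c = '\n' then [] :: pvSplitLF t else (pvSplitLF t).modifyHead (c :: ·)

def pvChunks (cs : List Char) : List (List Char) := pvSplitLF ((pvStep1 cs).map pvSubst)

def pvHasC (l : List Char) : Bool := l.any (fun c => !PySem.Chars.isspace c)

def pvCnt : Bool → List (List Char) → Nat
  | _, [] => 0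
  | _, [_] => 0
  | lh, x :: y :: r => (if lh || pvHasC x then 1 else 0) + pvCnt false (y :: r)

def pvFin : Bool → List (List Char) → Bool
  | lh, [] => lh
  | lh, [x] => lh || pvHasC x
  | _, _ :: y :: r => pvFin false (y :: r)

def pvW : List Char → Bool → Nat
  | [], _ => 0
  | c :: t, iw => if PySem.Chars.isspace c then pvW t false else (if iw then 0 else 1) + pvW t true

def pvNW (cs : List Char) : Nat := cs.countP (fun c => !PySem.Chars.isspace c)

lemma pv_replace_single : ∀ (fuel : Nat) (l acc : List Char), l.length ≤ fuel →
    PySem.Chars.replace.go ['\r'] ['\n'] fuel l acc = acc.reverse ++ l.map pvSubst := by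
  intro fuel
  induction fuel with
  | zero => intro l acc h; simp at h; subst h; simp [PySem.Chars.replace.go]
  | succ n ih =>
    intro l acc h
    match l with
    | [] => simp [PySem.Chars.replace.go]
    | c :: t =>
      rw [PySem.Chars.replace.go]
      simp only [List.length_cons] at h
      by_cases hc : c = '\r'
      · subst hc
        rw [if_pos (by simp [List.isPrefixOf])]
        simpa [pvSubst] using ih t (['\n'].reverse ++ acc) (by omega)
      · rw [if_neg (by simp [List.isPrefixOf, beq_iff_eq]; exact fun h => absurd h.symm hc)]
        rw [ih t _ (by omega)]
        simp [pvSubst, hc]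

lemma pv_replace_pair : ∀ (fuel : Nat) (l acc : List Char), l.length ≤ fuel →
    PySem.Chars.replace.go ['\r', '\n'] ['\n'] fuel l acc = acc.reverse ++ pvStep1 l := by
  intro fuel
  induction fuel with
  | zero => intro l acc h; simp at h; subst h; simp [PySem.Chars.replace.go, pvStep1]
  | succ n ih =>
    intro l acc h
    match l with
    | [] => simp [PySem.Chars.replace.go, pvStep1]
    | c :: t =>
      rw [PySem.Chars.replace.go]
      simp only [List.length_cons] at h
      by_cases hc : c = '\r' ∧ t.head? = some '\n'
      · obtain ⟨hc1, hc2⟩ := hc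
        subst hc1
        cases t with
        | nil => simp at hc2
        | cons c2 t2 =>
          simp only [List.head?_cons, Option.some.injEq] at hc2
          subst hc2
          rw [if_pos (by simp [List.isPrefixOf])]
          rw [pvStep1]
          simp only [List.length_cons] at h
          simpa using ih t2 (['\n'].reverse ++ acc) (by omega)
      · rw [if_neg ?_]
        · rw [pvStep1, if_neg hc]
          rw [ih t _ (by omega)]
          simp
        · simp only [List.isPrefixOf, Bool.and_eq_true, beq_iff_eq]
          intro hpre
          cases t with
          | nil => simp at hpre
          | cons c2 t2 =>
            simp [List.isPrefixOf] at hpre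
            exact hc ⟨hpre.1.symm, by simp [hpre.2.symm]⟩

lemma pv_splitLF_ne_nil (u : List Char) : pvSplitLF u ≠ [] := by
  match u with
  | [] => simp [pvSplitLF]
  | c :: t =>
    rw [pvSplitLF]
    split
    · simp
    · have := pv_splitLF_ne_nil t
      cases h : pvSplitLF t with
      | nil => exact absurd h this
      | cons x r => simp

lemma pv_splitOn_go : ∀ (fuel : Nat) (l cur : List Char) (acc : List (List Char)), l.length ≤ fuel →
    PySem.Chars.splitOn.go ['\n'] fuel l cur acc
      = acc.reverse ++ (pvSplitLF l).modifyHead (cur.reverse ++ ·) := by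
  intro fuel
  induction fuel with
  | zero => intro l cur acc h; simp at h; subst h; simp [PySem.Chars.splitOn.go, pvSplitLF]
  | succ n ih =>
    intro l cur acc h
    match l with
    | [] => simp [PySem.Chars.splitOn.go, pvSplitLF]
    | c :: t =>
      rw [PySem.Chars.splitOn.go]
      simp only [List.length_cons] at h
      by_cases hc : c = '\n'
      · subst hc
        rw [if_pos (by simp [List.isPrefixOf])]
        rw [pvSplitLF, if_pos rfl]
        simp only [List.length_singleton, List.drop_succ_cons, List.drop_zero]
        rw [ih t [] _ (by omega)]
        simp
        cases pvSplitLF t <;> simp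
      · rw [if_neg (by simp [List.isPrefixOf, beq_iff_eq]; exact fun h => absurd h.symm hc)]
        rw [ih t (c :: cur) acc (by omega)]
        rw [pvSplitLF, if_neg hc]
        cases hh : pvSplitLF t with
        | nil => exact absurd hh (pv_splitLF_ne_nil t)
        | cons x r => simp

lemma pv_split_lines_eq (cs : List Char) :
    PySem.Chars.splitOn
      (PySem.Chars.replace (PySem.Chars.replace cs ['\r', '\n'] ['\n']) ['\r'] ['\n'])
      ['\n'] = pvChunks cs := by
  have h1 : PySem.Chars.replace cs ['\r', '\n'] ['\n'] = pvStep1 cs := by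
    rw [PySem.Chars.replace, if_neg (by simp), pv_replace_pair cs.length cs [] le_rfl]
    simp
  have h2 : PySem.Chars.replace (pvStep1 cs) ['\r'] ['\n'] = (pvStep1 cs).map pvSubst := by
    rw [PySem.Chars.replace, if_neg (by simp), pv_replace_single _ _ [] le_rfl]
    simp
  rw [h1, h2, PySem.Chars.splitOn, pv_splitOn_go _ _ [] [] (by omega)]
  simp only [List.reverse_nil, List.nil_append, pvChunks]
  cases pvSplitLF ((pvStep1 cs).map pvSubst) <;> simp

lemma pv_strip_isEmpty (l : List Char) : (PySem.Chars.strip l).isEmpty = !pvHasC l := by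
  rw [Bool.eq_iff_iff]
  simp only [PySem.Chars.strip, PySem.Chars.rstrip, PySem.Chars.lstrip, List.isEmpty_iff,
    List.reverse_eq_nil_iff, List.dropWhile_eq_nil_iff, List.mem_reverse,
    pvHasC, Bool.not_eq_true', List.any_eq_false, Bool.not_eq_false]
  constructor
  · intro h c hc
    have hsplit : c ∈ l.takeWhile PySem.Chars.isspace ∨ c ∈ l.dropWhile PySem.Chars.isspace := by
      rw [← List.takeWhile_append_dropWhile (p := PySem.Chars.isspace) (l := l)] at hc
      exact List.mem_append.mp hc
    rcases hsplit with h1 | h1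
    · exact List.mem_takeWhile_imp h1
    · exact h c h1
  · intro h c hc
    exact h c ((List.dropWhile_sublist _).mem hc)

lemma pv_countP_chunks : ∀ (r : List (List Char)) (x : List Char),
    (x :: r).countP pvHasC = pvCnt false (x :: r) + (if pvFin false (x :: r) then 1 else 0) := by
  intro r
  induction r with
  | nil => intro x; simp [pvCnt, pvFin, List.countP_cons, List.countP_nil]
  | cons y r ih =>
    intro x
    rw [pvCnt, pvFin]
    have := ih y
    simp only [List.countP_cons, Bool.false_or] at this ⊢
    omega

lemma pv_cnt_modifyHead (lh : Bool) (c : Char) (x : List Char) (r : List (List Char)) :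
    pvCnt lh ((x :: r).modifyHead (c :: ·)) = pvCnt (lh || !PySem.Chars.isspace c) (x :: r) := by
  cases r with
  | nil => simp [pvCnt]
  | cons y r =>
    simp only [List.modifyHead_cons, pvCnt, pvHasC, List.any_cons, Bool.or_assoc]
    rfl

lemma pv_fin_modifyHead (lh : Bool) (c : Char) (x : List Char) (r : List (List Char)) :
    pvFin lh ((x :: r).modifyHead (c :: ·)) = pvFin (lh || !PySem.Chars.isspace c) (x :: r) := by
  cases r with
  | nil =>
    simp only [List.modifyHead_cons, pvFin, pvHasC, List.any_cons, Bool.or_assoc]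
  | cons y r => simp [pvFin]

lemma pv_split0_go_len : ∀ (l cur : List Char) (acc : List (List Char)),
    (PySem.Chars.split₀.go l cur acc).length
      = acc.length + (if cur.isEmpty then pvW l false else 1 + pvW l true) := by
  intro l
  induction l with
  | nil =>
    intro cur acc
    rw [PySem.Chars.split₀.go]
    rcases cur <;> simp [pvW]
  | cons c t ih =>
    intro cur acc
    rw [PySem.Chars.split₀.go]
    by_cases hc : PySem.Chars.isspace c = true
    · rw [if_pos hc]
      rcases cur with _ | ⟨d, cur⟩
      · rw [if_pos (by simp)]
        simp [ih [] acc, pvW, hc]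
      · rw [if_neg (by simp)]
        simp [ih, pvW, hc]
        omega
    · rw [if_neg hc]
      rw [ih (c :: cur) acc]
      rcases cur <;> simp [pvW, hc]

lemma pv_split0_go_sum : ∀ (l cur : List Char) (acc : List (List Char)),
    ((PySem.Chars.split₀.go l cur acc).map List.length).sum
      = (acc.reverse.map List.length).sum + cur.length + pvNW l := by
  intro l
  induction l with
  | nil =>
    intro cur acc
    rw [PySem.Chars.split₀.go]
    rcases cur <;> simp [pvNW]
  | cons c t ih =>
    intro cur acc
    rw [PySem.Chars.split₀.go]
    by_cases hc : PySem.Chars.isspace c = true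
    · rw [if_pos hc]
      rcases cur with _ | ⟨d, cur⟩
      · rw [if_pos (by simp)]
        simp [ih [] acc, pvNW, hc]
      · rw [if_neg (by simp)]
        simp [ih, pvNW, hc]
    · rw [if_neg hc]
      rw [ih (c :: cur) acc]
      simp [pvNW, List.countP_cons, hc]
      omega

lemma pv_chunks_crlf (t : List Char) : pvChunks ('\r' :: '\n' :: t) = [] :: pvChunks t := by
  rw [pvChunks, pvStep1, if_pos (by simp)]
  simp only [List.tail_cons, List.map_cons]
  rw [pvSplitLF, if_pos (by simp [pvSubst])]
  rfl

lemma pv_chunks_break (c : Char) (t : List Char) (h : c = '\r' ∨ c = '\n')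
    (hlook : ¬(c = '\r' ∧ t.head? = some '\n')) : pvChunks (c :: t) = [] :: pvChunks t := by
  rw [pvChunks, pvStep1, if_neg hlook]
  simp only [List.map_cons]
  rw [pvSplitLF, if_pos (by rcases h with h | h <;> simp [h, pvSubst])]
  rfl

lemma pv_chunks_other (c : Char) (t : List Char) (h : ¬(c = '\r' ∨ c = '\n')) :
    pvChunks (c :: t) = (pvChunks t).modifyHead (c :: ·) := by
  have h1 : c ≠ '\r' := fun hh => h (Or.inl hh)
  have h2 : c ≠ '\n' := fun hh => h (Or.inr hh)
  rw [pvChunks, pvStep1, if_neg (by intro hh; exact h1 hh.1)]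
  simp only [List.map_cons]
  rw [pvSplitLF, if_neg (by simp [pvSubst, h1, h2])]
  rw [show pvSubst c = c from by simp [pvSubst, h1]]
  rfl

lemma pv_scan_master : ∀ (cs : List Char) (lines ne w nw : Int) (lh iw : Bool),
    pvScan cs lines ne w nw lh iw =
      (lines + ((pvChunks cs).length : Int) - 1,
       ne + (pvCnt lh (pvChunks cs) : Int),
       w + (pvW cs iw : Int),
       nw + (pvNW cs : Int),
       pvFin lh (pvChunks cs)) := by
  intro cs lines ne w nw lh iw
  induction cs, lines, ne, w, nw, lh, iw using pvScan.induct with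
  | case1 lines ne w nw lh iw =>
    simp [pvScan, pvChunks, pvStep1, pvSplitLF, pvCnt, pvFin, pvW, pvNW, pvHasC]
  | case2 c t lines ne w nw lh iw h ih =>
    rw [pvScan, if_pos h]
    by_cases hlook : c = '\r' ∧ t.head? = some '\n'
    · obtain ⟨hc, hh⟩ := hlook
      subst hc
      cases t with
      | nil => simp at hh
      | cons c2 t2 =>
        simp only [List.head?_cons, Option.some.injEq] at hh
        subst hh
        rw [if_pos ⟨rfl, rfl⟩]
        simp only [dite_eq_ite] at ih
        rw [if_pos ⟨trivial, rfl⟩, List.tail_cons] at ih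
        rw [List.tail_cons, ih, pv_chunks_crlf]
        rcases hch : pvChunks t2 with _ | ⟨x, r⟩
        · exact absurd hch (pv_splitLF_ne_nil _)
        · simp only [List.length_cons, pvCnt, pvFin, pvHasC, List.any_nil, Bool.or_false]
          refine Prod.ext ?_ (Prod.ext ?_ (Prod.ext ?_ (Prod.ext ?_ ?_))) <;>
            simp [pvW, pvNW,
              show PySem.Chars.isspace '\r' = true from by decide,
              show PySem.Chars.isspace '\n' = true from by decide]
          · omega
          · rcases lh <;> simp <;> omega
    · rw [if_neg hlook]
      simp only [dite_eq_ite] at ih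
      rw [if_neg hlook] at ih
      rw [ih, pv_chunks_break c t h hlook]
      rcases hch : pvChunks t with _ | ⟨x, r⟩
      · exact absurd hch (pv_splitLF_ne_nil _)
      · simp only [List.length_cons, pvCnt, pvFin, pvHasC, List.any_nil, Bool.or_false]
        have hsp : PySem.Chars.isspace c = true := by
          rcases h with h | h <;> subst h <;> decide
        refine Prod.ext ?_ (Prod.ext ?_ (Prod.ext ?_ (Prod.ext ?_ ?_))) <;>
          simp [pvW, pvNW, hsp]
        · omega
        · rcases lh <;> simp <;> omega
  | case3 c t lines ne w nw lh iw h hsp ih =>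
    rw [pvScan, if_neg h, if_pos hsp]
    rw [ih, pv_chunks_other c t h]
    rcases hch : pvChunks t with _ | ⟨x, r⟩
    · exact absurd hch (pv_splitLF_ne_nil _)
    · rw [pv_cnt_modifyHead, pv_fin_modifyHead]
      simp [pvW, pvNW, hsp]
  | case4 c t lines ne w nw lh iw h hsp ih =>
    rw [pvScan, if_neg h, if_neg hsp]
    simp only [dite_eq_ite] at ih
    rw [ih, pv_chunks_other c t h]
    rcases hch : pvChunks t with _ | ⟨x, r⟩
    · exact absurd hch (pv_splitLF_ne_nil _)
    · rw [pv_cnt_modifyHead, pv_fin_modifyHead]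
      simp only [hsp, Bool.not_false, Bool.or_true]
      refine Prod.ext ?_ (Prod.ext ?_ (Prod.ext ?_ (Prod.ext ?_ ?_))) <;>
        simp [pvW, pvNW, hsp]
      · rcases iw <;> simp <;> omega
      · omega

lemma pv_words_len (cs : List Char) : (PySem.Chars.split₀ cs).length = pvW cs false := by
  rw [PySem.Chars.split₀, pv_split0_go_len]
  simp

lemma pv_words_sum (cs : List Char) :
    ((PySem.Chars.split₀ cs).map (fun w => (w.length : Int))).sum = (pvNW cs : Int) := by
  have h := pv_split0_go_sum cs [] []
  rw [PySem.Chars.split₀] at *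
  have : ((PySem.Chars.split₀.go cs [] []).map (fun w => (w.length : Int))).sum
      = (((PySem.Chars.split₀.go cs [] []).map List.length).sum : Int) := by
    induction PySem.Chars.split₀.go cs [] [] with
    | nil => simp
    | cons a l ih => simp [ih]
  rw [this, h]
  simp

lemma pv_nonempty_count (cs : List Char) :
    ((pvChunks cs).filter (fun line => !(PySem.Chars.strip line).isEmpty)).length
      = pvCnt false (pvChunks cs) + (if pvFin false (pvChunks cs) then 1 else 0) := by
  rcases hch : pvChunks cs with _ | ⟨x, r⟩
  · exact absurd hch (pv_splitLF_ne_nil _)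
  · rw [← pv_countP_chunks]
    rw [← List.countP_eq_length_filter]
    apply List.countP_congr
    intro l _
    rw [pv_strip_isEmpty]
    simp

lemma pv_final (text : String) : get_text_stats text = get_text_stats_alt text := by
  simp only [get_text_stats, get_text_stats_alt, split_lines, remove_empty_lines]
  rw [pv_split_lines_eq, pv_scan_master]
  obtain ⟨x, r, hch⟩ : ∃ x r, pvChunks text.toList = x :: r := by
    rcases h : pvChunks text.toList with _ | ⟨x, r⟩
    · exact absurd h (pv_splitLF_ne_nil _)
    · exact ⟨x, r, rfl⟩
  have hlen : (1 : Int) + ((pvChunks text.toList).length : Int) - 1 = ((pvChunks text.toList).length : Int) := by ring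
  have hne := pv_nonempty_count text.toList
  have hws := pv_words_len text.toList
  have hsum := pv_words_sum text.toList
  refine List.ext_getElem (by simp) ?_
  intro i h1 h2
  simp only [List.length_cons, List.length_nil] at h2
  interval_cases i <;> simp only [List.getElem_cons_zero, List.getElem_cons_succ] <;> refine Prod.ext rfl ?_
  · rw [hlen]
  · rw [hne]
    rcases pvFin false (pvChunks text.toList) <;> simp
  · rw [hws]; simp
  · rw [hlen, hch]
    simp
  · rw [hws, hsum]
    simp

-- ===== VERDICT (by name: the statement is the Claim_ definition above) =====
theorem get_text_stats_spec : Claim_equal_get_text_stats := by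
  intro text _
  exact pv_final text
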